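-- pv_equiv track=rewrite | github.com/xtolly/layout-rag | services/layout_service.py | calculate_diff_info
-- ===== SOURCE A (Python) =====
-- def calculate_diff_info(query_parts: list, template_parts: list) -> dict:
--     """计算零件组成差异"""
--     q_counts = {}
--     for p in query_parts:
--         pt = p.get("part_type")
--         q_counts[pt] = q_counts.get(pt, 0) + 1
--
--     t_counts = {}
--     for p in template_parts:
--         pt = p.get("part_type")
--         t_counts[pt] = t_counts.get(pt, 0) + 1
--
--     all_types = set(list(q_counts.keys()) + list(t_counts.keys()))
--     matched, extra, missing = 0, 0, 0
--     for pt in all_types: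
--         qc, tc = q_counts.get(pt, 0), t_counts.get(pt, 0)
--         matched += min(qc, tc)
--         if qc > tc:
--             extra += (qc - tc)
--         if tc > qc:
--             missing += (tc - qc)
--     return {"matched": matched, "extra": extra, "missing": missing}
-- ===== SOURCE B (Python) =====
-- def calculate_diff_info(query_parts: list, template_parts: list) -> dict:
--     """计算零件组成差异"""
--     remaining = {}
--     for p in template_parts:
--         pt = p.get("part_type")
--         remaining[pt] = remaining.get(pt, 0) + 1
--     matched = 0
--     for p in query_parts:
--         pt = p.get("part_type")
--         if remaining.get(pt, 0) > 0:
--             remaining[pt] = remaining[pt] - 1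
--             matched += 1
--     return {"matched": matched,
--             "extra": len(query_parts) - matched,
--             "missing": len(template_parts) - matched}
-- ===== Notes on version B (the rewrite author's own statement) =====
-- stated objective: alternative
-- what changed: B never builds a query-side counter or the union-of-types set: it greedily consumes a template-side counter while scanning query_parts once (each query part matches iff its type still has remaining template count), and derives extra/missing by subtracting matched from the two list lengths.
import Mathlib
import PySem

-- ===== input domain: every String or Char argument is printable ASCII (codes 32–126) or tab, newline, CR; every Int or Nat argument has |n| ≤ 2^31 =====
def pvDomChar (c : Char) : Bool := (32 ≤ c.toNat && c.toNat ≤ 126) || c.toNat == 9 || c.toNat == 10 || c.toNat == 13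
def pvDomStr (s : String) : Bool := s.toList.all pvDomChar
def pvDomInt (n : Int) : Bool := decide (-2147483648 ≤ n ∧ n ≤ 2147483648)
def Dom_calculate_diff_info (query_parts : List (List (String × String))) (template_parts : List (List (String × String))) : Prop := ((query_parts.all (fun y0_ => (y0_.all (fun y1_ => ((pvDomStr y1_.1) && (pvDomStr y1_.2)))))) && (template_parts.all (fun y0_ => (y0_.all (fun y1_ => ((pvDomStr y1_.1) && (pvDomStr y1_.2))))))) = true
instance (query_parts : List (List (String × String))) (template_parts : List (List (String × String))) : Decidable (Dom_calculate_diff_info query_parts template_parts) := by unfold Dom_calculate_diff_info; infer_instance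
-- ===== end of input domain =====

-- B replaces A's two counters + union-of-types loop by a greedy single scan of query_parts that
-- consumes a template-side counter; extra/missing are derived from the list lengths (alternative
-- decomposition, same cost).

-- p.get("part_type"): first-match lookup in the association list (Python dict .get)
def pvPartType (p : List (String × String)) : Option String :=
  (PySem.Dict.mk p).get? "part_type"

-- ===== PORT A =====
def calculate_diff_info (query_parts : List (List (String × String))) (template_parts : List (List (String × String))) : List (String × Int) :=
  let q_counts := query_parts.foldl (fun d p =>
    let pt := pvPartType p
    d.insert pt (d.getD pt 0 + 1)) PySem.Dict.empty
  let t_counts := template_parts.foldl (fun d p =>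
    let pt := pvPartType p
    d.insert pt (d.getD pt 0 + 1)) PySem.Dict.empty
  -- all_types is a Python set; it is consumed only by an order-independent sum
  let all_types := PySem.Set.ofList (q_counts.keys ++ t_counts.keys)
  let r := all_types.foldl (fun (acc : Int × Int × Int) pt =>
    let qc := q_counts.getD pt 0
    let tc := t_counts.getD pt 0
    (acc.1 + min qc tc,
     if qc > tc then acc.2.1 + (qc - tc) else acc.2.1,
     if tc > qc then acc.2.2 + (tc - qc) else acc.2.2)) (0, 0, 0)
  [("matched", r.1), ("extra", r.2.1), ("missing", r.2.2)]

-- ===== PORT B =====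
def calculate_diff_info_alt (query_parts : List (List (String × String))) (template_parts : List (List (String × String))) : List (String × Int) :=
  let remaining := template_parts.foldl (fun d p =>
    let pt := pvPartType p
    d.insert pt (d.getD pt 0 + 1)) PySem.Dict.empty
  -- greedy consumption scan: state = (matched, remaining)
  let st := query_parts.foldl (fun (st : Int × PySem.Dict (Option String) Int) p =>
    let pt := pvPartType p
    if st.2.getD pt 0 > 0 then
      (st.1 + 1, st.2.insert pt (st.2.getD pt 0 - 1))
    else st) (0, remaining)
  let matched := st.1
  [("matched", matched),
   ("extra", (query_parts.length : Int) - matched),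
   ("missing", (template_parts.length : Int) - matched)]

-- ===== PRECONDITION & SPEC =====
def Spec_calculate_diff_info (query_parts : List (List (String × String))) (template_parts : List (List (String × String))) (out : List (String × Int)) : Prop := out = calculate_diff_info_alt query_parts template_parts
instance (query_parts : List (List (String × String))) (template_parts : List (List (String × String))) (out : List (String × Int)) : Decidable (Spec_calculate_diff_info query_parts template_parts out) := by unfold Spec_calculate_diff_info; infer_instance

-- ===== CLAIM (what is proved, stated in full; the proofs are below) =====
def Claim_equal_calculate_diff_info : Prop := ∀ (query_parts : List (List (String × String))) (template_parts : List (List (String × String))), Dom_calculate_diff_info query_parts template_parts → Spec_calculate_diff_info query_parts template_parts (calculate_diff_info query_parts template_parts)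

-- ===== LEMMAS AND PROOFS =====

-- with a lawful BEq, List.count does not depend on which instance is used
theorem pv_count_congr {α : Type} [inst1 : BEq α] [LawfulBEq α] [DecidableEq α] (x : α) (l : List α) :
    @List.count α inst1 x l = @List.count α instBEqOfDecidableEq x l := by
  induction l with
  | nil => rfl
  | cons y ys ih => by_cases h : y = x <;> simp [List.count_cons, ih, h]

-- the counting loop of both ports is Counter(map pvPartType parts)
theorem pv_counter_eq (parts : List (List (String × String))) :
    parts.foldl (fun d p =>
      d.insert (pvPartType p) (d.getD (pvPartType p) 0 + 1)) PySem.Dict.empty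
    = PySem.Dict.counter (parts.map pvPartType) := by
  rw [← PySem.Dict.foldl_insert_getD_add_one_eq_counter, List.foldl_map]

-- a triple-accumulator fold of three pointwise additions is a triple of sums
theorem pv_foldl3 {α : Type} (s1 s2 s3 : α → Int) (l : List α) (a b c : Int) :
    l.foldl (fun (acc : Int × Int × Int) x =>
      (acc.1 + s1 x, acc.2.1 + s2 x, acc.2.2 + s3 x)) (a, b, c)
    = (a + (l.map s1).sum, b + (l.map s2).sum, c + (l.map s3).sum) := by
  induction l generalizing a b c with
  | nil => simp
  | cons x xs ih => simp [ih]; refine ⟨by ring, by ring, by ring⟩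

-- summing occurrence counts over any nodup list containing all of l's elements gives l's length
theorem pv_sum_count {α : Type} [DecidableEq α] (S l : List α) (c : α → Int)
    (hS : S.Nodup) (hsub : ∀ x ∈ l, x ∈ S) (hc : ∀ x, c x = l.count x) :
    (S.map c).sum = l.length := by
  rw [List.map_congr_left (fun x _ => hc x)]
  have hsubset : l.toFinset ⊆ S.toFinset := fun x hx =>
    List.mem_toFinset.2 (hsub x (List.mem_toFinset.1 hx))
  have hzero : ∀ x ∈ S.toFinset, x ∉ l.toFinset → (l.count x : Int) = 0 := by
    intro x _ hx
    simp [List.count_eq_zero_of_not_mem (fun h => hx (List.mem_toFinset.2 h))]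
  have key : ∑ a ∈ l.toFinset, l.count a = l.length := by
    simpa using Multiset.toFinset_sum_count_eq (l : Multiset α)
  rw [← List.sum_toFinset _ hS, ← Finset.sum_subset hsubset hzero]
  exact_mod_cast congrArg (Nat.cast (R := Int)) key

-- a sum of pointwise differences is a difference of sums
theorem pv_sum_sub {α : Type} (S : List α) (f g : α → Int) :
    (S.map (fun x => f x - g x)).sum = (S.map f).sum - (S.map g).sum := by
  induction S with
  | nil => simp
  | cons x xs ih => simp [ih]; ring

-- B's greedy consumption fold: its matched component is, per type, how many of the query
-- occurrences the remaining dictionary can still cover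
theorem pv_greedy {κ : Type} [DecidableEq κ] [BEq κ] [LawfulBEq κ] (l : List κ)
    (m : Int) (d : PySem.Dict κ Int) :
    (l.foldl (fun (st : Int × PySem.Dict κ Int) pt =>
      if st.2.getD pt 0 > 0 then
        (st.1 + 1, st.2.insert pt (st.2.getD pt 0 - 1))
      else st) (m, d)).1
    = m + ∑ x ∈ l.toFinset, min ((l.count x : Int)) (max (d.getD x 0) 0) := by
  induction l generalizing m d with
  | nil => simp
  | cons pt rest ih =>
    have hsplit : ∀ (g : κ → Int),
        ∑ x ∈ (pt :: rest).toFinset, g x = g pt + ∑ x ∈ rest.toFinset.erase pt, g x := by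
      intro g
      rw [List.toFinset_cons, ← Finset.insert_erase (Finset.mem_insert_self pt rest.toFinset),
          Finset.sum_insert (Finset.notMem_erase pt _), Finset.erase_insert_eq_erase]
    have hknn : (0 : Int) ≤ (rest.count pt : Int) := Int.natCast_nonneg _
    by_cases h : d.getD pt 0 > 0
    · simp only [List.foldl_cons, if_pos h, ih, hsplit]
      -- on the erase set, both summands agree (key ≠ pt, same count, same dict value)
      have herase : ∑ x ∈ rest.toFinset.erase pt,
            min ((rest.count x : Int)) (max ((d.insert pt (d.getD pt 0 - 1)).getD x 0) 0)
          = ∑ x ∈ rest.toFinset.erase pt,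
            min (((pt :: rest).count x : Int)) (max (d.getD x 0) 0) := by
        refine Finset.sum_congr rfl (fun x hx => ?_)
        have hne : x ≠ pt := Finset.ne_of_mem_erase hx
        rw [PySem.Dict.getD_insert, if_neg hne, List.count_cons, if_neg (by simp [Ne.symm hne])]
        simp
      have hpt : min (((pt :: rest).count pt : Int)) (max (d.getD pt 0) 0)
          = min ((rest.count pt : Int)) (max ((d.insert pt (d.getD pt 0 - 1)).getD pt 0) 0) + 1 := by
        rw [PySem.Dict.getD_insert, if_pos rfl, List.count_cons, if_pos (by simp)]
        push_cast
        omega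
      have hsum : ∑ x ∈ rest.toFinset,
            min ((rest.count x : Int)) (max ((d.insert pt (d.getD pt 0 - 1)).getD x 0) 0)
          = min ((rest.count pt : Int)) (max ((d.insert pt (d.getD pt 0 - 1)).getD pt 0) 0)
            + ∑ x ∈ rest.toFinset.erase pt,
              min ((rest.count x : Int)) (max ((d.insert pt (d.getD pt 0 - 1)).getD x 0) 0) := by
        by_cases hm : pt ∈ rest.toFinset
        · exact (Finset.add_sum_erase _ _ hm).symm
        · have h0 : rest.count pt = 0 :=
            List.count_eq_zero.2 (fun hmem => hm (List.mem_toFinset.2 hmem))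
          have hz : min ((rest.count pt : Int))
              (max ((d.insert pt (d.getD pt 0 - 1)).getD pt 0) 0) = 0 := by
            rw [PySem.Dict.getD_insert, if_pos rfl, h0]
            push_cast
            omega
          rw [Finset.erase_eq_of_notMem hm, hz]
          ring
      rw [hsum, herase, hpt]
      ring
    · simp only [List.foldl_cons, if_neg h, ih, hsplit]
      have hc0 : min (((pt :: rest).count pt : Int)) (max (d.getD pt 0) 0) = 0 := by
        have : (0 : Int) ≤ ((pt :: rest).count pt : Int) := Int.natCast_nonneg _
        omega
      have herase : ∑ x ∈ rest.toFinset.erase pt,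
            min ((rest.count x : Int)) (max (d.getD x 0) 0)
          = ∑ x ∈ rest.toFinset.erase pt,
            min (((pt :: rest).count x : Int)) (max (d.getD x 0) 0) := by
        refine Finset.sum_congr rfl (fun x hx => ?_)
        have hne : x ≠ pt := Finset.ne_of_mem_erase hx
        rw [List.count_cons, if_neg (by simp [Ne.symm hne])]
        simp
      have hz : min ((rest.count pt : Int)) (max (d.getD pt 0) 0) = 0 := by omega
      have hsum : ∑ x ∈ rest.toFinset, min ((rest.count x : Int)) (max (d.getD x 0) 0)
          = min ((rest.count pt : Int)) (max (d.getD pt 0) 0)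
            + ∑ x ∈ rest.toFinset.erase pt, min ((rest.count x : Int)) (max (d.getD x 0) 0) := by
        by_cases hm : pt ∈ rest.toFinset
        · exact (Finset.add_sum_erase _ _ hm).symm
        · rw [Finset.erase_eq_of_notMem hm, hz]
          ring
      rw [hsum, herase, hc0, hz]

-- main equality, proved pointwise via sums over the union-of-types set
theorem calculate_diff_info_spec_aux (query_parts template_parts : List (List (String × String))) :
    calculate_diff_info query_parts template_parts
    = calculate_diff_info_alt query_parts template_parts := by
  simp only [calculate_diff_info, calculate_diff_info_alt]
  rw [pv_counter_eq query_parts, pv_counter_eq template_parts,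
      ← List.foldl_map (f := pvPartType)
        (g := fun (st : Int × PySem.Dict (Option String) Int) pt =>
          if st.2.getD pt 0 > 0 then (st.1 + 1, st.2.insert pt (st.2.getD pt 0 - 1)) else st),
      pv_greedy]
  set qs := query_parts.map pvPartType with hqs
  set ts := template_parts.map pvPartType with hts
  rw [PySem.Dict.keys_counter qs, PySem.Dict.keys_counter ts]
  set S := PySem.Set.ofList (PySem.Set.ofList qs ++ PySem.Set.ofList ts) with hSdef
  have hSnd : S.Nodup := PySem.Set.nodup_ofList _
  have hSmem : ∀ x, x ∈ S ↔ x ∈ qs ∨ x ∈ ts := by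
    intro x
    simp [hSdef, PySem.Set.mem_ofList, List.mem_append]
  have hcnt_q : ∀ x, (PySem.Dict.counter qs).getD x 0 = (qs.count x : Int) := by
    intro x; rw [PySem.Dict.getD_counter]
  have hcnt_t : ∀ x, (PySem.Dict.counter ts).getD x 0 = (ts.count x : Int) := by
    intro x; rw [PySem.Dict.getD_counter]
  -- B's greedy matched, as a sum over S
  have hBmin : ∀ x, min ((qs.count x : Int)) (max ((PySem.Dict.counter ts).getD x 0) 0)
      = min ((qs.count x : Int)) (ts.count x) := by
    intro x
    rw [hcnt_t]
    have : (0 : Int) ≤ (ts.count x : Int) := Int.natCast_nonneg _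
    omega
  have hqsub : qs.toFinset ⊆ S.toFinset := fun x hx =>
    List.mem_toFinset.2 ((hSmem x).2 (Or.inl (List.mem_toFinset.1 hx)))
  have hgreedy : (∑ x ∈ qs.toFinset, min ((qs.count x : Int)) (max ((PySem.Dict.counter ts).getD x 0) 0))
      = (S.map (fun pt => min ((qs.count pt : Int)) (ts.count pt))).sum := by
    rw [Finset.sum_congr rfl (fun x _ => hBmin x), ← List.sum_toFinset _ hSnd]
    refine Finset.sum_subset hqsub (fun x _ hx => ?_)
    have h0 : qs.count x = 0 :=
      List.count_eq_zero.2 (fun h => hx (List.mem_toFinset.2 h))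
    have : (0 : Int) ≤ (ts.count x : Int) := Int.natCast_nonneg _
    rw [h0]
    omega
  -- sums of plain counts over S are the list lengths
  have hsq : (S.map (fun x => (qs.count x : Int))).sum = qs.length :=
    pv_sum_count S qs _ hSnd (fun x hx => (hSmem x).2 (Or.inl hx)) (fun x => by exact_mod_cast pv_count_congr x qs)
  have hst : (S.map (fun x => (ts.count x : Int))).sum = ts.length :=
    pv_sum_count S ts _ hSnd (fun x hx => (hSmem x).2 (Or.inr hx)) (fun x => by exact_mod_cast pv_count_congr x ts)
  have hlq : qs.length = query_parts.length := by rw [hqs, List.length_map]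
  have hlt : ts.length = template_parts.length := by rw [hts, List.length_map]
  -- now compare the three components
  have hbody : (fun (acc : Int × Int × Int) pt =>
      (acc.1 + min ((PySem.Dict.counter qs).getD pt 0) ((PySem.Dict.counter ts).getD pt 0),
       if (PySem.Dict.counter qs).getD pt 0 > (PySem.Dict.counter ts).getD pt 0 then
         acc.2.1 + ((PySem.Dict.counter qs).getD pt 0 - (PySem.Dict.counter ts).getD pt 0)
       else acc.2.1,
       if (PySem.Dict.counter ts).getD pt 0 > (PySem.Dict.counter qs).getD pt 0 then
         acc.2.2 + ((PySem.Dict.counter ts).getD pt 0 - (PySem.Dict.counter qs).getD pt 0)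
       else acc.2.2))
      = (fun (acc : Int × Int × Int) pt =>
      (acc.1 + min ((qs.count pt : Int)) (ts.count pt),
       acc.2.1 + ((qs.count pt : Int) - min ((qs.count pt : Int)) (ts.count pt)),
       acc.2.2 + ((ts.count pt : Int) - min ((qs.count pt : Int)) (ts.count pt)))) := by
    funext acc pt
    simp only [hcnt_q, hcnt_t, Prod.mk.injEq]
    refine ⟨trivial, ?_, ?_⟩ <;> split_ifs <;> omega
  rw [hbody, pv_foldl3, hgreedy,
      pv_sum_sub S (fun x => (qs.count x : Int)) (fun x => min ((qs.count x : Int)) (ts.count x)),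
      pv_sum_sub S (fun x => (ts.count x : Int)) (fun x => min ((qs.count x : Int)) (ts.count x)),
      hsq, hst, hlq, hlt]
  simp

-- ===== VERDICT (by name: the statement is the Claim_ definition above) =====
theorem calculate_diff_info_spec : Claim_equal_calculate_diff_info := by
  intro q t _
  exact calculate_diff_info_spec_aux q t
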